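-- pv_equiv track=rewrite | github.com/pypi-data/pypi-mirror-400 | packages/agent-supervisor-memory/agent_supervisor_memory-0.2.35.tar.gz/agent_supervisor_memory-0.2.35/src/agent_supervisor_memory/tools/projects.py | _normalize_lock_key
-- ===== SOURCE A (Python) =====
-- def _normalize_lock_key(lock: str) -> str:
--     raw = str(lock or "").strip()
--     if not raw:
--         return ""
--     for ch in ("*", "?", "["):
--         idx = raw.find(ch)
--         if idx >= 0:
--             raw = raw[:idx]
--     return raw.rstrip("/").strip()
-- ===== SOURCE B (Python) =====
-- def _normalize_lock_key(lock: str) -> str: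
--     raw = str(lock or "").strip()
--     if not raw:
--         return ""
--     cut = next((i for i, c in enumerate(raw) if c in "*?["), len(raw))
--     return raw[:cut].rstrip("/").strip()
-- ===== Notes on version B (the rewrite author's own statement) =====
-- stated objective: simpler
-- what changed: Replaced A's three sequential find-and-truncate passes (one per wildcard character) with a single scan that locates the earliest wildcard position and slices once.
import Mathlib
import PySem

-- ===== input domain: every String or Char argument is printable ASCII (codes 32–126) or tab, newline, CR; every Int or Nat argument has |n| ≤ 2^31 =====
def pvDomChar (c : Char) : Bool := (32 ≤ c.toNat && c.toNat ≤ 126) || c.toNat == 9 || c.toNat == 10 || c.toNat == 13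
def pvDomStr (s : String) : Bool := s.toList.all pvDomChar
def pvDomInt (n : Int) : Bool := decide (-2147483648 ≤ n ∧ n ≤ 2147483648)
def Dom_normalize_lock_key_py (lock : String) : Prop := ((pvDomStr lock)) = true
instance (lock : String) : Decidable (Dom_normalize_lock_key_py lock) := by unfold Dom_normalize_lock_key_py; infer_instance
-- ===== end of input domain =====

-- B replaces A's three sequential find-and-truncate passes by a single scan for the
-- first wildcard character followed by one slice (objective: simpler).

-- hand port of s.rstrip('/'): drop the trailing '/' characters (exact: '/' is a single
-- ASCII char, rstrip with that char set removes exactly the maximal trailing run of '/')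
def pvRstripSlash (s : List Char) : List Char :=
  (s.reverse.dropWhile (fun c => c == '/')).reverse

-- ===== PORT A =====
def normalize_lock_key_py (lock : String) : String :=
  let raw := PySem.Chars.strip lock.toList
  if raw = [] then ""
  else
    -- for ch in ("*", "?", "["): idx = raw.find(ch); if idx >= 0: raw = raw[:idx]
    let raw := [['*'], ['?'], ['[']].foldl
      (fun r ch =>
        let idx := PySem.Chars.find r ch
        if 0 ≤ idx then PySem.List.slice r none (some idx) else r) raw
    String.ofList (PySem.Chars.strip (pvRstripSlash raw))

-- ===== PORT B =====
def normalize_lock_key_py_alt (lock : String) : String :=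
  let raw := PySem.Chars.strip lock.toList
  if raw = [] then ""
  else
    -- cut = next((i for i, c in enumerate(raw) if c in "*?["), len(raw))
    let cut := (raw.findIdx? (fun c => PySem.Chars.isIn [c] ['*', '?', '['])).getD raw.length
    String.ofList (PySem.Chars.strip (pvRstripSlash (PySem.List.slice raw none (some (cut : Int)))))

-- ===== PRECONDITION & SPEC =====
def Spec_normalize_lock_key_py (lock : String) (out : String) : Prop := out = normalize_lock_key_py_alt lock
instance (lock : String) (out : String) : Decidable (Spec_normalize_lock_key_py lock out) := by unfold Spec_normalize_lock_key_py; infer_instance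

-- ===== CLAIM (what is proved, stated in full; the proofs are below) =====
def Claim_equal_normalize_lock_key_py : Prop := ∀ (lock : String), Dom_normalize_lock_key_py lock → Spec_normalize_lock_key_py lock (normalize_lock_key_py lock)

-- ===== LEMMAS AND PROOFS =====

-- l.take n is the maximal prefix on which p holds, provided p holds before n and fails at n
lemma takeWhile_eq_take_of {α : Type} (p : α → Bool) (l : List α) (n : Nat)
    (h1 : ∀ i (_ : i < n) (h' : i < l.length), p l[i] = true)
    (h2 : ∀ (h : n < l.length), p l[n] = false) :
    l.takeWhile p = l.take n := by
  induction l generalizing n with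
  | nil => simp
  | cons a t ih =>
    cases n with
    | zero => simpa [List.takeWhile_cons] using h2 (by simp)
    | succ m =>
      have ha : p a = true := h1 0 (Nat.succ_pos m) (by simp)
      simp only [List.takeWhile_cons, ha, if_true, List.take_succ_cons]
      rw [ih m (fun i hi hi' => h1 (i + 1) (by omega) (by simpa using hi'))
            (fun h => h2 (by simpa using h))]

-- one pass of A's loop truncates at the first occurrence of c, i.e. is a takeWhile
lemma stepEq (r : List Char) (c : Char) :
    (let idx := PySem.Chars.find r [c];
     if 0 ≤ idx then PySem.List.slice r none (some idx) else r)
    = r.takeWhile (fun x => !(x == c)) := by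
  by_cases h : 0 ≤ PySem.Chars.find r [c]
  · have hpref : ∀ i, [c] <+: r.drop i ↔ r[i]? = some c := by
      intro i
      rw [← List.head?_drop]
      cases r.drop i <;> simp [List.prefix_cons_iff, eq_comm]
    have hsp := PySem.Chars.find_spec (s := r) (sub := [c]) h
    simp only [if_pos h, PySem.List.slice_to r h]
    refine (takeWhile_eq_take_of _ _ _ ?_ ?_).symm
    · intro i hi hi'
      have := hsp.2 i hi
      rw [hpref i] at this
      simp only [Bool.not_eq_true', beq_eq_false_iff_ne, ne_eq]
      intro hc; exact this (by simp [List.getElem?_eq_getElem hi', hc])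
    · intro hlt
      have := (hpref _).mp hsp.1
      rw [List.getElem?_eq_getElem hlt] at this
      simp [Option.some_inj.mp this]
  · simp only [if_neg h]
    have hneg : PySem.Chars.find r [c] = -1 := by
      have := PySem.Chars.neg_one_le_find (s := r) (sub := [c]); omega
    have hnotin : c ∉ r := by
      have := (PySem.Chars.find_eq_neg_one_iff r [c]).mp hneg
      rw [List.singleton_infix_iff] at this; exact this
    exact (List.takeWhile_eq_self_iff.mpr (fun x hx => by
      simp only [Bool.not_eq_true', beq_eq_false_iff_ne, ne_eq]
      intro hxc; exact hnotin (hxc ▸ hx))).symm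

-- the singleton-membership test B performs
lemma isIn_singleton (x : Char) (s : List Char) : PySem.Chars.isIn [x] s = s.contains x := by
  rw [Bool.eq_iff_iff, PySem.Chars.isIn_iff_infix, List.singleton_infix_iff, List.contains_iff_mem]

-- both tails compute the same truncated list
lemma core (r : List Char) :
    ([['*'], ['?'], ['[']].foldl
      (fun r ch =>
        let idx := PySem.Chars.find r ch
        if 0 ≤ idx then PySem.List.slice r none (some idx) else r) r)
    = PySem.List.slice r none
        (some (((r.findIdx? (fun c => PySem.Chars.isIn [c] ['*', '?', '['])).getD r.length : Nat) : Int)) := by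
  rw [PySem.List.slice_to_natCast, ← List.findIdx_eq_getD_findIdx?]
  rw [← takeWhile_eq_take_of (fun c => !(PySem.Chars.isIn [c] ['*', '?', '[']))  r
        (r.findIdx (fun c => PySem.Chars.isIn [c] ['*', '?', '[']))
        (fun i hi _ => by simpa using List.not_of_lt_findIdx hi)
        (fun h => by simpa using List.findIdx_getElem (w := h))]
  simp only [List.foldl_cons, List.foldl_nil, stepEq, List.takeWhile_takeWhile]
  congr 1
  funext x
  simp only [isIn_singleton]
  by_cases h1 : x = '*' <;> by_cases h2 : x = '?' <;> by_cases h3 : x = '[' <;> simp [h1, h2, h3]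

-- ===== VERDICT (by name: the statement is the Claim_ definition above) =====
theorem normalize_lock_key_py_spec : Claim_equal_normalize_lock_key_py := by
  intro lock _
  unfold Spec_normalize_lock_key_py normalize_lock_key_py normalize_lock_key_py_alt
  simp only []
  by_cases h : PySem.Chars.strip lock.toList = []
  · simp [h]
  · simp only [h, if_neg, not_false_eq_true, core]
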